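-- pv_equiv track=rewrite | github.com/megzz19/Personalized-diet-and-Workout-planner--G-G--by-Meghana-S | recommendation_engine.py | classify_food_preference
-- ===== SOURCE A (Python) =====
-- def classify_food_preference(food_name, food_category):
--     """
--     Classifies food into 'Veg', 'Non-Veg', or 'Vegan' based on name and category heuristics.
--     """
--     name_lower = food_name.lower()
--     cat_lower = str(food_category).lower()
--
--     # Non-Veg Keywords
--     non_veg_keywords = ['chicken', 'egg', 'meat', 'fish', 'mutton', 'prawn', 'beef', 'pork',
--                         'ham', 'bacon', 'salami', 'sausage', 'crab', 'lobia curry'] # Lobia is actually veg (black eyed peas), correcting below if needed.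
--                         # Wait, Lobia is veg. Removing potential false positives if any.
--                         # Standard Non-Veg list.
--
--     # Refined Non-Veg List
--     non_veg_keywords = ['chicken', 'egg', 'meat', 'fish', 'mutton', 'prawn', 'beef', 'pork',
--                         'ham', 'bacon', 'salami', 'sausage', 'crab', 'non vegetarian', 'non-veg']
--
--     if any(keyword in name_lower for keyword in non_veg_keywords):
--         return 'Non-Veg'
--
--     # Vegan Loop-holes (Dairy/Animal derived) causing it to be just 'Veg'
--     # If it's not Non-Veg, it's at least Veg. But is it Vegan?
--     # Exclude Dairy and Honey
--     dairy_keywords = ['milk', 'cheese', 'paneer', 'butter', 'curd', 'yogurt', 'cream', 'ghee',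
--                       'whey', 'lassi', 'buttermilk', 'khoya', 'malai']
--
--     if any(keyword in name_lower for keyword in dairy_keywords):
--         return 'Veg'
--
--     # Heuristic: Baked goods usually have egg/butter unless specified
--     baked_keywords = ['cake', 'pastry', 'biscuit', 'cookie', 'pudding', 'pie', 'tart', 'flan', 'mousse', 'souffle']
--     if any(keyword in name_lower for keyword in baked_keywords):
--         # Could be eggless, but safer to classify as Veg (Lacto-Ovo) or Non-Veg if contains egg
--         if 'eggless' in name_lower:
--             return 'Veg'
--         # If it explicitly says Egg, it was caught in Non-Veg check check?
--         # Wait, 'Egg' is in non_veg_keywords.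
--         # So here it's likely just dairy/butter.
--         return 'Veg'
--
--     # If it passes all above, assume Vegan (Plant-based)
--     return 'Vegan'
-- ===== SOURCE B (Python) =====
-- def classify_food_preference(food_name, food_category):
--     """Single left-to-right scan over the name: at each position test keyword prefixes,
--     returning 'Non-Veg' immediately on a non-veg match and flagging veg matches."""
--     name_lower = food_name.lower()
--     cat_lower = str(food_category).lower()
--
--     NON_VEG = ['chicken', 'egg', 'meat', 'fish', 'mutton', 'prawn', 'beef', 'pork',
--                'ham', 'bacon', 'salami', 'sausage', 'crab', 'non vegetarian', 'non-veg']
--     VEG = ['milk', 'cheese', 'paneer', 'butter', 'curd', 'yogurt', 'cream', 'ghee',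
--            'whey', 'lassi', 'buttermilk', 'khoya', 'malai',
--            'cake', 'pastry', 'biscuit', 'cookie', 'pudding', 'pie', 'tart', 'flan',
--            'mousse', 'souffle']
--
--     found_veg = False
--     for i in range(len(name_lower)):
--         if any(name_lower.startswith(kw, i) for kw in NON_VEG):
--             return 'Non-Veg'
--         found_veg = found_veg or any(name_lower.startswith(kw, i) for kw in VEG)
--     return 'Veg' if found_veg else 'Vegan'
-- ===== Notes on version B (the rewrite author's own statement) =====
-- stated objective: alternative
-- what changed: Replaced A's three keyword-outer any(kw in name) substring scans with a single position-outer left-to-right scan of the name that tests keyword prefixes at each index, returning 'Non-Veg' immediately and accumulating a veg flag (dairy and baked merged into one list; the dead 'eggless' branch dropped).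
import Mathlib
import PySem

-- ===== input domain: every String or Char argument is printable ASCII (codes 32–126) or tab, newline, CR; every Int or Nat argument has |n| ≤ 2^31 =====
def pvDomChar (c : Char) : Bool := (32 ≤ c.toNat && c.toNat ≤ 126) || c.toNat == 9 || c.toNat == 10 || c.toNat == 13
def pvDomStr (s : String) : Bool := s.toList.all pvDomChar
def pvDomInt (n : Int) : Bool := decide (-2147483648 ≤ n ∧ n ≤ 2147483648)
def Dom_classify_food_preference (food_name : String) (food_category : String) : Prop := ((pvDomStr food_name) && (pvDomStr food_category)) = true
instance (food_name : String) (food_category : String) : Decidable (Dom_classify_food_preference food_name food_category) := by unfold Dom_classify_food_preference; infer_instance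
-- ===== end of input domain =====

-- B replaces A's three keyword-outer substring scans with one position-outer left-to-right
-- scan of the name testing keyword prefixes at each index (alternative decomposition).

-- ===== PORT A =====
def classify_food_preference (food_name : String) (food_category : String) : String :=
  let name_lower := PySem.Str.lower food_name
  let _cat_lower := PySem.Str.lower food_category
  -- first (commented-as-wrong) assignment of non_veg_keywords, immediately overwritten
  let non_veg_keywords := ["chicken", "egg", "meat", "fish", "mutton", "prawn", "beef", "pork",
                           "ham", "bacon", "salami", "sausage", "crab", "lobia curry"]
  let non_veg_keywords := ["chicken", "egg", "meat", "fish", "mutton", "prawn", "beef", "pork",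
                           "ham", "bacon", "salami", "sausage", "crab", "non vegetarian", "non-veg"]
  if non_veg_keywords.any (fun k => PySem.Str.isIn k name_lower) then "Non-Veg"
  else
    let dairy_keywords := ["milk", "cheese", "paneer", "butter", "curd", "yogurt", "cream", "ghee",
                           "whey", "lassi", "buttermilk", "khoya", "malai"]
    if dairy_keywords.any (fun k => PySem.Str.isIn k name_lower) then "Veg"
    else
      let baked_keywords := ["cake", "pastry", "biscuit", "cookie", "pudding", "pie", "tart", "flan", "mousse", "souffle"]
      if baked_keywords.any (fun k => PySem.Str.isIn k name_lower) then
        if PySem.Str.isIn "eggless" name_lower then "Veg" else "Veg"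
      else "Vegan"

-- ===== PORT B =====
-- B's keyword lists (as lists of chars, matching Python's startswith(kw, i) tests)
def pvNonVeg : List (List Char) :=
  ["chicken", "egg", "meat", "fish", "mutton", "prawn", "beef", "pork",
   "ham", "bacon", "salami", "sausage", "crab", "non vegetarian", "non-veg"].map String.toList
def pvVeg : List (List Char) :=
  ["milk", "cheese", "paneer", "butter", "curd", "yogurt", "cream", "ghee",
   "whey", "lassi", "buttermilk", "khoya", "malai",
   "cake", "pastry", "biscuit", "cookie", "pudding", "pie", "tart", "flan",
   "mousse", "souffle"].map String.toList

-- B's for-loop over positions i of name_lower: the recursion walks the suffixes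
-- name_lower[i:], so 'name_lower.startswith(kw, i)' is 'kw is a prefix of the suffix'.
def pvScan (foundVeg : Bool) : List Char → String
  | [] => if foundVeg then "Veg" else "Vegan"
  | c :: rest =>
    if pvNonVeg.any (fun k => PySem.Chars.startswith (c :: rest) k) then "Non-Veg"
    else pvScan (foundVeg || pvVeg.any (fun k => PySem.Chars.startswith (c :: rest) k)) rest

def classify_food_preference_alt (food_name : String) (food_category : String) : String :=
  let name_lower := PySem.Str.lower food_name
  let _cat_lower := PySem.Str.lower food_category
  pvScan false name_lower.toList

-- ===== PRECONDITION & SPEC =====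
def Spec_classify_food_preference (food_name : String) (food_category : String) (out : String) : Prop := out = classify_food_preference_alt food_name food_category
instance (food_name : String) (food_category : String) (out : String) : Decidable (Spec_classify_food_preference food_name food_category out) := by unfold Spec_classify_food_preference; infer_instance

-- ===== CLAIM =====
def Claim_equal_classify_food_preference : Prop := ∀ (food_name : String) (food_category : String), Dom_classify_food_preference food_name food_category → Spec_classify_food_preference food_name food_category (classify_food_preference food_name food_category)

-- ===== LEMMAS AND PROOFS =====

-- any distributes over a pointwise disjunction of predicates.
theorem pv_any_or {α : Type} (l : List α) (f g : α → Bool) :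
    l.any (fun x => f x || g x) = (l.any f || l.any g) := by
  induction l with
  | nil => rfl
  | cons a t ih => simp [List.any_cons, ih, Bool.or_assoc, Bool.or_left_comm]

-- The scan returns 'Non-Veg' iff a non-veg keyword is an infix; otherwise 'Veg' iff the
-- flag is already set or a veg keyword is an infix; otherwise 'Vegan'.
theorem pvScan_eq (cs : List Char) (fv : Bool) :
    pvScan fv cs =
      if pvNonVeg.any (fun k => decide (k <:+: cs)) then "Non-Veg"
      else if fv || pvVeg.any (fun k => decide (k <:+: cs)) then "Veg" else "Vegan" := by
  induction cs generalizing fv with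
  | nil => cases fv <;> decide
  | cons c rest ih =>
    have hsplit : ∀ (k : List Char),
        (decide (k <:+: (c :: rest)) : Bool) = (PySem.Chars.startswith (c :: rest) k || decide (k <:+: rest)) := by
      intro k
      by_cases h : k <:+: (c :: rest)
      · rcases (List.infix_cons_iff).1 h with hp | hi
        · simp [h, (PySem.Chars.startswith_iff _ _).2 hp]
        · simp [h, hi]
      · have hp : ¬ k <+: (c :: rest) := fun hpp => h (List.infix_cons_iff.2 (Or.inl hpp))
        have hi : ¬ k <:+: rest := fun hii => h (List.infix_cons_iff.2 (Or.inr hii))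
        have hsw : PySem.Chars.startswith (c :: rest) k = false := by
          cases hx : PySem.Chars.startswith (c :: rest) k
          · rfl
          · exact absurd ((PySem.Chars.startswith_iff _ _).1 hx) hp
        simp [h, hi, hsw]
    have hfun : (fun (k : List Char) => (decide (k <:+: (c :: rest)) : Bool))
        = fun k => PySem.Chars.startswith (c :: rest) k || decide (k <:+: rest) :=
      funext hsplit
    have hanyNV : pvNonVeg.any (fun k => decide (k <:+: (c :: rest)))
        = (pvNonVeg.any (fun k => PySem.Chars.startswith (c :: rest) k)
           || pvNonVeg.any (fun k => decide (k <:+: rest))) := by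
      rw [hfun, pv_any_or]
    have hanyV : pvVeg.any (fun k => decide (k <:+: (c :: rest)))
        = (pvVeg.any (fun k => PySem.Chars.startswith (c :: rest) k)
           || pvVeg.any (fun k => decide (k <:+: rest))) := by
      rw [hfun, pv_any_or]
    simp only [pvScan, hanyNV, hanyV, ih]
    by_cases h1 : pvNonVeg.any (fun k => PySem.Chars.startswith (c :: rest) k) = true
    · simp [h1]
    · simp only [Bool.not_eq_true] at h1
      simp only [h1, Bool.false_or]
      by_cases h2 : pvNonVeg.any (fun k => decide (k <:+: rest)) = true
      · simp [h2]
      · simp only [Bool.not_eq_true] at h2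
        simp [h2, Bool.or_assoc]

-- ===== VERDICT =====
theorem classify_food_preference_spec : Claim_equal_classify_food_preference := by
  intro food_name food_category _
  unfold Spec_classify_food_preference classify_food_preference classify_food_preference_alt
  rw [pvScan_eq]
  simp only [pvNonVeg, pvVeg, List.map, List.any_cons, List.any_nil, Bool.false_or,
    PySem.Str.isIn_iff_infix]
  simp only [← PySem.Str.isIn_iff_infix]
  split_ifs <;> simp_all
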